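-- pv_equiv track=rewrite | github.com/crper/agent-skills | skills/github-fetch-release-notes/scripts/github_fetch_release_notes/gh_client.py | changelog_name_rank
-- ===== SOURCE A (Python) =====
-- from typing import Any, Dict, List, Optional, Tuple
--
-- CHANGELOG_FILENAMES = (
--     'CHANGELOG.md',
--     'changelog.md',
--     'Changelog.md',
--     'CHANGELOG',
--     'changelog',
-- )
--
-- def changelog_name_rank(name: str) -> Optional[int]:
--     for index, candidate in enumerate(CHANGELOG_FILENAMES):
--         if name == candidate:
--             return index
--
--     low = name.lower()
--     for index, candidate in enumerate(CHANGELOG_FILENAMES):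
--         if low == candidate.lower():
--             return len(CHANGELOG_FILENAMES) + index
--     return None
-- ===== SOURCE B (Python) =====
-- CHANGELOG_FILENAMES = (
--     'CHANGELOG.md',
--     'changelog.md',
--     'Changelog.md',
--     'CHANGELOG',
--     'changelog',
-- )
--
-- def changelog_name_rank(name):
--     low = name.lower()
--     fallback = None
--     for index, candidate in enumerate(CHANGELOG_FILENAMES):
--         if name == candidate:
--             return index
--         if fallback is None and low == candidate.lower():
--             fallback = index
--     if fallback is not None:
--         return len(CHANGELOG_FILENAMES) + fallback
--     return None
-- ===== Notes on version B (the rewrite author's own statement) =====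
-- stated objective: alternative
-- what changed: Replaced A's two sequential scans (exact, then case-insensitive) with a single pass that returns exact matches immediately and records the first case-insensitive match as a fallback applied after the loop.
import Mathlib
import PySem

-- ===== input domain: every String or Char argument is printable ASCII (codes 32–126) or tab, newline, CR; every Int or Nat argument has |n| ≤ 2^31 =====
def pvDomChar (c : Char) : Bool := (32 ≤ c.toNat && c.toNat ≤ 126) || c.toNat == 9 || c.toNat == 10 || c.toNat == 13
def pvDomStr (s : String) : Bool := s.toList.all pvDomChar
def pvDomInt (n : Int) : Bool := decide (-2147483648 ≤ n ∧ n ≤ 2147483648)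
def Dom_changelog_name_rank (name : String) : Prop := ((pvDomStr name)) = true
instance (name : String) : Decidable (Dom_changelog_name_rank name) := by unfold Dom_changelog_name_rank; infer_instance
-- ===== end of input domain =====

-- ===== PORT A =====
-- One honest line: B merges A's two scans into a single pass with a first-case-insensitive-match fallback (alternative decomposition, same cost).
def CHANGELOG_FILENAMES : List String :=
  ["CHANGELOG.md", "changelog.md", "Changelog.md", "CHANGELOG", "changelog"]

-- A: first loop (exact match, early return), then second loop on name.lower().
def changelog_name_rank (name : String) : Option Int :=
  match (PySem.List.enumerate CHANGELOG_FILENAMES).findSome?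
      (fun ic => if name = ic.2 then some ic.1 else none) with
  | some v => some v
  | none =>
      let low := PySem.Str.lower name
      match (PySem.List.enumerate CHANGELOG_FILENAMES).findSome?
          (fun ic => if low = PySem.Str.lower ic.2
                     then some ((CHANGELOG_FILENAMES.length : Int) + ic.1) else none) with
      | some v => some v
      | none => none

-- ===== PORT B =====
-- B: single pass; exact hit returns at once, first case-insensitive hit is recorded as fallback.
def rankLoop (name low : String) (fallback : Option Int) : List (Int × String) → Option Int
  | [] => fallback.map (fun f => ((CHANGELOG_FILENAMES.length : Int) + f))
  | ic :: rest =>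
      if name = ic.2 then some ic.1
      else rankLoop name low
        (if fallback = none ∧ low = PySem.Str.lower ic.2 then some ic.1 else fallback)
        rest

def changelog_name_rank_alt (name : String) : Option Int :=
  let low := PySem.Str.lower name
  rankLoop name low none (PySem.List.enumerate CHANGELOG_FILENAMES)

-- ===== PRECONDITION & SPEC =====
def Spec_changelog_name_rank (name : String) (out : Option Int) : Prop := out = changelog_name_rank_alt name
instance (name : String) (out : Option Int) : Decidable (Spec_changelog_name_rank name out) := by unfold Spec_changelog_name_rank; infer_instance

-- ===== CLAIM (what is proved, stated in full; the proofs are below) =====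
def Claim_equal_changelog_name_rank : Prop := ∀ (name : String), Dom_changelog_name_rank name → Spec_changelog_name_rank name (changelog_name_rank name)

-- ===== LEMMAS AND PROOFS =====
theorem lower_c0 : PySem.Str.lower "CHANGELOG.md" = "changelog.md" := by decide
theorem lower_c1 : PySem.Str.lower "changelog.md" = "changelog.md" := by decide
theorem lower_c2 : PySem.Str.lower "Changelog.md" = "changelog.md" := by decide
theorem lower_c3 : PySem.Str.lower "CHANGELOG" = "changelog" := by decide
theorem lower_c4 : PySem.Str.lower "changelog" = "changelog" := by decide

-- ===== VERDICT (by name: the statement is the Claim_ definition above) =====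
theorem changelog_name_rank_spec : Claim_equal_changelog_name_rank := by
  intro name _
  unfold Spec_changelog_name_rank
  by_cases h0 : name = "CHANGELOG.md" <;>
  by_cases h1 : name = "changelog.md" <;>
  by_cases h2 : name = "Changelog.md" <;>
  by_cases h3 : name = "CHANGELOG" <;>
  by_cases h4 : name = "changelog" <;>
  by_cases l0 : PySem.Str.lower name = "changelog.md" <;>
  by_cases l1 : PySem.Str.lower name = "changelog" <;>
  simp_all [changelog_name_rank, changelog_name_rank_alt, rankLoop,
    CHANGELOG_FILENAMES, PySem.List.enumerate, lower_c0, lower_c1, lower_c2, lower_c3, lower_c4]
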